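-- pv_equiv track=rewrite | github.com/sunnycomes/IoVision | src/common/post_parser.py | _find_content
-- ===== SOURCE A (Python) =====
-- def _find_content(lines):
--     content = ""
--     startAt = 1
--     for line in lines[1:]:
--         startAt += 1
--         if line.find("---") > -1:
--             break;
--
--     for line in lines[startAt:]:
--         content += line
--
--     return content
-- ===== SOURCE B (Python) =====
-- def _find_content(lines):
--     content = ""
--     found = False
--     for line in lines[1:]:
--         if found:
--             content += line
--         elif "---" in line:
--             found = True
--     return content
-- ===== Notes on version B (the rewrite author's own statement) =====
-- stated objective: simpler
-- what changed: Replaces A's two sequential loops (an index counter with break to find the separator, then a second slice-and-concatenate pass) with one flagged single pass over lines[1:] that starts accumulating after the separator line.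
import Mathlib
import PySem

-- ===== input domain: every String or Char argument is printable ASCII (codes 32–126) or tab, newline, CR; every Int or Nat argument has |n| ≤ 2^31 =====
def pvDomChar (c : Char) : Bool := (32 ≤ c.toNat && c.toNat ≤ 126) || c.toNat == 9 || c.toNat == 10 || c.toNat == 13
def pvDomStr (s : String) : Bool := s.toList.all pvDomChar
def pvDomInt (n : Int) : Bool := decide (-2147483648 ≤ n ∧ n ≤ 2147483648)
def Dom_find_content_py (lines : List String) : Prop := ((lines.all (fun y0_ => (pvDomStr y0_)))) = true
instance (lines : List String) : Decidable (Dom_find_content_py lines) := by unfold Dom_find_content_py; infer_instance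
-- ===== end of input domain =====

-- B replaces A's two sequential loops (counter-with-break, then slice concatenation)
-- with one flagged single pass over lines[1:]; objective: simpler.

-- ===== PORT A =====
-- first loop of A: 'for line in lines[1:]: startAt += 1; if line.find("---") > -1: break'
def find_content_py_loop1 (s : Int) : List String → Int
  | [] => s
  | l :: rest =>
    if PySem.Str.find l "---" > -1 then s + 1 else find_content_py_loop1 (s + 1) rest

def find_content_py (lines : List String) : String :=
  (PySem.List.slice lines
      (some (find_content_py_loop1 1 (PySem.List.slice lines (some 1) none))) none).foldl
    (fun content line => content ++ line) ""

-- ===== PORT B =====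
-- single pass with a 'found' flag over lines[1:]
def find_content_py_alt_loop (found : Bool) (content : String) : List String → String
  | [] => content
  | l :: rest =>
    if found then find_content_py_alt_loop found (content ++ l) rest
    else if PySem.Str.isIn "---" l then find_content_py_alt_loop true content rest
    else find_content_py_alt_loop found content rest

def find_content_py_alt (lines : List String) : String :=
  find_content_py_alt_loop false "" (PySem.List.slice lines (some 1) none)

-- ===== PRECONDITION & SPEC =====
def Spec_find_content_py (lines : List String) (out : String) : Prop := out = find_content_py_alt lines
instance (lines : List String) (out : String) : Decidable (Spec_find_content_py lines out) := by unfold Spec_find_content_py; infer_instance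

-- ===== CLAIM (what is proved, stated in full; the proofs are below) =====
def Claim_equal_find_content_py : Prop := ∀ (lines : List String), Dom_find_content_py lines → Spec_find_content_py lines (find_content_py lines)

-- ===== LEMMAS AND PROOFS =====

theorem loop1_ge (t : List String) : ∀ s : Int, s ≤ find_content_py_loop1 s t := by
  induction t with
  | nil => intro s; simp [find_content_py_loop1]
  | cons l rest ih =>
    intro s
    simp only [find_content_py_loop1]
    split
    · omega
    · have := ih (s + 1); omega

theorem loop1_shift (t : List String) : ∀ s : Int,
    find_content_py_loop1 (s + 1) t = find_content_py_loop1 s t + 1 := by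
  induction t with
  | nil => intro s; simp [find_content_py_loop1]
  | cons l rest ih =>
    intro s
    simp only [find_content_py_loop1]
    split
    · rfl
    · exact ih (s + 1)

theorem find_iff_isIn (l : String) : PySem.Str.find l "---" > -1 ↔ PySem.Str.isIn "---" l = true := by
  rw [PySem.Str.isIn_iff_infix, ← PySem.Str.find_nonneg_iff]
  omega

-- B's found=true state concatenates the rest
theorem alt_loop_true (t : List String) : ∀ c : String,
    find_content_py_alt_loop true c t = t.foldl (fun content line => content ++ line) c := by
  induction t with
  | nil => intro c; simp [find_content_py_alt_loop]
  | cons l rest ih => intro c; simp [find_content_py_alt_loop, ih]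

-- main invariant: B's flagged pass over t equals concatenating the part of t after
-- the first separator (where A's counter, started at 1, stops)
theorem main_inv (t : List String) :
    (t.drop ((find_content_py_loop1 1 t).toNat - 1)).foldl (fun content line => content ++ line) ""
      = find_content_py_alt_loop false "" t := by
  induction t with
  | nil => simp [find_content_py_loop1, find_content_py_alt_loop]
  | cons l rest ih =>
    by_cases h : PySem.Str.find l "---" > -1
    · have hin : PySem.Str.isIn "---" l = true := (find_iff_isIn l).mp h
      simp only [find_content_py_loop1, find_content_py_alt_loop, if_pos h, hin, if_true,
        Bool.false_eq_true, if_false]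
      simp [alt_loop_true]
    · have hin : ¬ PySem.Str.isIn "---" l = true := fun hc => h ((find_iff_isIn l).mpr hc)
      simp only [find_content_py_loop1, find_content_py_alt_loop, if_neg h, if_neg hin,
        Bool.false_eq_true, if_false]
      have hsh := loop1_shift rest 1
      have hge := loop1_ge rest 1
      have : (find_content_py_loop1 (1 + 1) rest).toNat - 1
           = ((find_content_py_loop1 1 rest).toNat - 1) + 1 := by
        rw [show (1:Int) + 1 = 1 + 1 from rfl, hsh]; omega
      rw [this, List.drop_succ_cons]
      exact ih

-- ===== VERDICT (by name: the statement is the Claim_ definition above) =====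
theorem find_content_py_spec : Claim_equal_find_content_py := by
  intro lines _
  unfold Spec_find_content_py find_content_py find_content_py_alt
  rw [PySem.List.slice_from lines (by omega : (0:Int) ≤ 1)]
  set t := lines.drop (1:Int).toNat with ht
  have hge := loop1_ge t 1
  rw [PySem.List.slice_from lines (by omega : (0:Int) ≤ find_content_py_loop1 1 t)]
  have : lines.drop (find_content_py_loop1 1 t).toNat
       = t.drop ((find_content_py_loop1 1 t).toNat - 1) := by
    rw [ht, List.drop_drop]
    congr 1
    rw [← ht]
    omega
  rw [this]
  exact main_inv t
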